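-- pv_equiv track=rewrite | github.com/FM-uib/INF368 | compare_generators_Ex1/TFrecords_generator/TFrecords_generator_simple_NN.py | get_first_int_in_string
-- ===== SOURCE A (Python) =====
-- def get_first_int_in_string(s):
-- 	begin_idx = 0
-- 	end_idx = 0
-- 	for idx, char in enumerate(s):
-- 		if char.isdigit():
-- 			begin_idx = idx
-- 			break
-- 	for idx, char in enumerate(s[begin_idx:],begin_idx):
-- 		if not char.isdigit():
-- 			end_idx = idx
-- 			break
-- 	return int(s[begin_idx:end_idx]), begin_idx, end_idx
-- ===== SOURCE B (Python) =====
-- # B: one flagged pass over enumerate(s) instead of A's two scans (and no re-slice for the second scan).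
-- # Where A raises because the digit run reaches the end of the string, B naturally returns the integer
-- # with end = len(s); where no digit exists, B raises ValueError (A also raises there).
-- def get_first_int_in_string(s):
--     begin = end = None
--     for i, ch in enumerate(s):
--         if ch.isdigit():
--             if begin is None:
--                 begin = i
--         elif begin is not None:
--             end = i
--             break
--     if begin is None:
--         raise ValueError("no integer found in string")
--     if end is None:
--         end = len(s)
--     return int(s[begin:end]), begin, end
-- ===== Notes on version B (the rewrite author's own statement) =====
-- stated objective: alternative
-- what changed: B replaces A's two sequential enumerate scans (find first digit, then re-slice and find first non-digit) by a single flagged pass that records begin on the first digit and breaks on the first non-digit after it.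
-- outside the precondition, e.g. on get_first_int_in_string(''): A raises ValueError, B raises ValueError; on get_first_int_in_string('ab12'): A raises ValueError, B returns (12, 2, 4)
-- crash fix: A raises ValueError on int('') when the string has no digit or its first digit run reaches the end of the string; on the latter inputs B returns the integer with end = len(s) (on no-digit strings B also raises ValueError). — e.g. on get_first_int_in_string("ab12"): A raises ValueError, B returns (12, 2, 4)
import Mathlib
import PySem

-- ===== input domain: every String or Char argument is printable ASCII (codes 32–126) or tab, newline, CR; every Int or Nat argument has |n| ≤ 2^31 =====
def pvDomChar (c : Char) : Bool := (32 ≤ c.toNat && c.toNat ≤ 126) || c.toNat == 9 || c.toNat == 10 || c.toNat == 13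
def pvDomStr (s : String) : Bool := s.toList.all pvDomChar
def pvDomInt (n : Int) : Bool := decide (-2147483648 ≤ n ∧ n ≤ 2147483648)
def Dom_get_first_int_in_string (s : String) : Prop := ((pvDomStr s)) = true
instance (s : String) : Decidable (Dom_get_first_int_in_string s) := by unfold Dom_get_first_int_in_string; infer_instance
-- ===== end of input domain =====

-- B merges A's two sequential scans into one flagged pass over enumerate(s) (objective: alternative decomposition);
-- where A raises ValueError because the digit run reaches the end of the string, B returns the integer with end = len(s).


-- ===== PORT A =====
-- first loop of A: first index whose char is a digit (break), else the initial 0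
def pvAFindDigit : List (Int × Char) → Int
  | [] => 0
  | (i, c) :: rest => if PySem.Chars.isdigit c then i else pvAFindDigit rest

-- second loop of A: first index whose char is NOT a digit (break), else the initial 0
def pvAFindNonDigit : List (Int × Char) → Int
  | [] => 0
  | (i, c) :: rest => if !(PySem.Chars.isdigit c) then i else pvAFindNonDigit rest

def get_first_int_in_string (s : String) : Int × Int × Int :=
  let cs := s.toList
  let begin_idx := pvAFindDigit (PySem.List.enumerate cs 0)
  let end_idx := pvAFindNonDigit (PySem.List.enumerate (PySem.List.slice cs (some begin_idx) none) begin_idx)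
  -- int(s[begin_idx:end_idx]); Python raises ValueError where ofChars? is none (excluded by Pre_)
  match PySem.Int.ofChars? (PySem.List.slice cs (some begin_idx) (some end_idx)) with
  | some v => (v, begin_idx, end_idx)
  | none => (0, begin_idx, end_idx)

-- ===== PORT B =====
-- B's single flagged pass: state = begin (none until the first digit); returns (begin?, end?);
-- end? = none means the loop finished without a break
def pvBLoop : List (Int × Char) → Option Int → Option Int × Option Int
  | [], b => (b, none)
  | (i, c) :: rest, b =>
      if PySem.Chars.isdigit c then
        match b with
        | none => pvBLoop rest (some i)
        | some _ => pvBLoop rest b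
      else
        match b with
        | some _ => (b, some i)
        | none => pvBLoop rest none

def get_first_int_in_string_alt (s : String) : Int × Int × Int :=
  let cs := s.toList
  match pvBLoop (PySem.List.enumerate cs 0) none with
  | (none, _) => (0, 0, 0)   -- Python B raises ValueError here (no digit; excluded by Pre_)
  | (some b, e?) =>
      let e := e?.getD (PySem.List.len cs)
      match PySem.Int.ofChars? (PySem.List.slice cs (some b) (some e)) with
      | some v => (v, b, e)
      | none => (0, b, e)    -- unreachable: the slice is a nonempty digit run

-- ===== PRECONDITION & SPEC =====
-- Pre_ excludes exactly the inputs where A raises ValueError on int(''): strings with no digit,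
-- and strings whose first digit run extends to the end of the string.
def Pre_get_first_int_in_string (s : String) : Prop :=
  ((s.toList.dropWhile (fun c => !(PySem.Chars.isdigit c))).dropWhile (fun c => PySem.Chars.isdigit c)) ≠ []
instance (s : String) : Decidable (Pre_get_first_int_in_string s) := by unfold Pre_get_first_int_in_string; infer_instance

def pvWitness_get_first_int_in_string : String := "ab12cd"

-- A raises ValueError (int('')) when the string contains a digit but its first digit run reaches the
-- end of the string; B returns that integer with end = len(s).
def Raises_get_first_int_in_string (s : String) : Prop :=
  (s.toList.dropWhile (fun c => !(PySem.Chars.isdigit c))) ≠ [] ∧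
  ((s.toList.dropWhile (fun c => !(PySem.Chars.isdigit c))).dropWhile (fun c => PySem.Chars.isdigit c)) = []
instance (s : String) : Decidable (Raises_get_first_int_in_string s) := by unfold Raises_get_first_int_in_string; infer_instance

def pvRaiseWitness_get_first_int_in_string : String := "ab12"
def pvRaiseWitnessOut_get_first_int_in_string : Int × Int × Int := (12, 2, 4)

def Spec_get_first_int_in_string (s : String) (out : Int × Int × Int) : Prop := out = get_first_int_in_string_alt s
instance (s : String) (out : Int × Int × Int) : Decidable (Spec_get_first_int_in_string s out) := by unfold Spec_get_first_int_in_string; infer_instance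

-- ===== CLAIM (what is proved, stated in full; the proofs are below) =====
def Claim_equal_get_first_int_in_string : Prop := ∀ (s : String), Dom_get_first_int_in_string s → Pre_get_first_int_in_string s → Spec_get_first_int_in_string s (get_first_int_in_string s)

def Claim_raises_get_first_int_in_string : Prop :=
  (∀ (s : String), Dom_get_first_int_in_string s → Raises_get_first_int_in_string s → ¬ Pre_get_first_int_in_string s) ∧
  (Dom_get_first_int_in_string (pvRaiseWitness_get_first_int_in_string) ∧ Raises_get_first_int_in_string (pvRaiseWitness_get_first_int_in_string) ∧ get_first_int_in_string_alt (pvRaiseWitness_get_first_int_in_string) = pvRaiseWitnessOut_get_first_int_in_string)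

-- ===== LEMMAS AND PROOFS =====

theorem pvAFindDigit_spec (p : List Char) (hp : ∀ c ∈ p, PySem.Chars.isdigit c = false)
    (x : Char) (hx : PySem.Chars.isdigit x = true) (rest : List Char) (k : Int) :
    pvAFindDigit (PySem.List.enumerate (p ++ x :: rest) k) = k + p.length := by
  induction p generalizing k with
  | nil => simp [PySem.List.enumerate_cons, pvAFindDigit, hx]
  | cons c p ih =>
      have hc := hp c (by simp)
      simp only [List.cons_append, PySem.List.enumerate_cons, pvAFindDigit, hc]
      rw [ih (fun c hc => hp c (by simp [hc]))]
      simp; ring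

theorem pvAFindNonDigit_spec (d : List Char) (hd : ∀ c ∈ d, PySem.Chars.isdigit c = true)
    (y : Char) (hy : PySem.Chars.isdigit y = false) (rest : List Char) (k : Int) :
    pvAFindNonDigit (PySem.List.enumerate (d ++ y :: rest) k) = k + d.length := by
  induction d generalizing k with
  | nil => simp [PySem.List.enumerate_cons, pvAFindNonDigit, hy]
  | cons c d ih =>
      have hc := hd c (by simp)
      simp only [List.cons_append, PySem.List.enumerate_cons, pvAFindNonDigit, hc]
      simp only [Bool.not_true, Bool.false_eq_true, if_false]
      rw [ih (fun c hc => hd c (by simp [hc]))]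
      simp; ring

theorem pvBLoop_skip (p : List Char) (hp : ∀ c ∈ p, PySem.Chars.isdigit c = false)
    (x : Char) (hx : PySem.Chars.isdigit x = true) (rest : List Char) (k : Int) :
    pvBLoop (PySem.List.enumerate (p ++ x :: rest) k) none
      = pvBLoop (PySem.List.enumerate rest (k + p.length + 1)) (some (k + p.length)) := by
  induction p generalizing k with
  | nil => simp [PySem.List.enumerate_cons, pvBLoop, hx]
  | cons c p ih =>
      have hc := hp c (by simp)
      simp only [List.cons_append, PySem.List.enumerate_cons, pvBLoop, hc]
      simp only [Bool.false_eq_true, if_false]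
      rw [ih (fun c hc => hp c (by simp [hc]))]
      have : k + 1 + (p.length : Int) = k + (p.length + 1 : Nat) := by push_cast; ring
      simp only [List.length_cons]
      rw [this]

theorem pvBLoop_run (d : List Char) (hd : ∀ c ∈ d, PySem.Chars.isdigit c = true)
    (y : Char) (hy : PySem.Chars.isdigit y = false) (rest : List Char) (k b : Int) :
    pvBLoop (PySem.List.enumerate (d ++ y :: rest) k) (some b) = (some b, some (k + d.length)) := by
  induction d generalizing k with
  | nil => simp [PySem.List.enumerate_cons, pvBLoop, hy]
  | cons c d ih =>
      have hc := hd c (by simp)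
      simp only [List.cons_append, PySem.List.enumerate_cons, pvBLoop, hc]
      simp only [if_true]
      rw [ih (fun c hc => hd c (by simp [hc]))]
      simp; ring

-- ===== VERDICT (by name: the statement is the Claim_ definition above) =====
theorem get_first_int_in_string_spec : Claim_equal_get_first_int_in_string := by
  intro s _ hpre
  unfold Spec_get_first_int_in_string
  unfold Pre_get_first_int_in_string at hpre
  -- decompose s.toList = p ++ c :: (d' ++ y :: q') : leading non-digits, nonempty digit run, first non-digit after
  rcases hct : (s.toList.dropWhile (fun c => !(PySem.Chars.isdigit c))) with _ | ⟨c, t'⟩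
  · exact absurd (by rw [hct]; rfl) hpre
  have hcdig : PySem.Chars.isdigit c = true := by
    have h := List.head_dropWhile_not (fun c => !(PySem.Chars.isdigit c)) (l := s.toList)
      (w := by rw [hct]; simp)
    simp only [hct, List.head_cons, Bool.not_eq_false'] at h
    exact h
  rcases hqq : (t'.dropWhile (fun c => PySem.Chars.isdigit c)) with _ | ⟨y, q'⟩
  · exact absurd (by rw [hct, List.dropWhile_cons_of_pos hcdig, hqq]) hpre
  have hy : PySem.Chars.isdigit y = false := by
    have h := List.head_dropWhile_not (fun c => PySem.Chars.isdigit c) (l := t')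
      (w := by rw [hqq]; simp)
    simp only [hqq, List.head_cons] at h
    exact h
  have ht' : t' = t'.takeWhile (fun c => PySem.Chars.isdigit c) ++ y :: q' := by
    conv_lhs => rw [← List.takeWhile_append_dropWhile (p := fun c => PySem.Chars.isdigit c) (l := t')]
    rw [hqq]
  have hcs_eq : s.toList = s.toList.takeWhile (fun c => !(PySem.Chars.isdigit c))
      ++ c :: (t'.takeWhile (fun c => PySem.Chars.isdigit c) ++ y :: q') := by
    conv_lhs => rw [← List.takeWhile_append_dropWhile (p := fun c => !(PySem.Chars.isdigit c)) (l := s.toList)]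
    rw [hct]
    congr 1
    rw [← ht']
  have hp_all : ∀ z ∈ s.toList.takeWhile (fun c => !(PySem.Chars.isdigit c)), PySem.Chars.isdigit z = false := by
    intro z hz
    have := List.mem_takeWhile_imp hz
    simpa using this
  have hd'_all : ∀ z ∈ t'.takeWhile (fun c => PySem.Chars.isdigit c), PySem.Chars.isdigit z = true :=
    fun z hz => List.mem_takeWhile_imp hz
  -- abbreviations
  generalize hpn : s.toList.takeWhile (fun c => !(PySem.Chars.isdigit c)) = p at hcs_eq hp_all
  generalize hdn : t'.takeWhile (fun c => PySem.Chars.isdigit c) = d' at hcs_eq hd'_all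
  have hbegin : pvAFindDigit (PySem.List.enumerate s.toList 0) = (p.length : Int) := by
    rw [hcs_eq, pvAFindDigit_spec p hp_all c hcdig _ 0]; ring
  have hdrop : PySem.List.slice s.toList (some (p.length : Int)) none = c :: (d' ++ y :: q') := by
    rw [PySem.List.slice_from_natCast, hcs_eq, List.drop_left]
  have hcd_all : ∀ z ∈ c :: d', PySem.Chars.isdigit z = true := by
    intro z hz
    rcases List.mem_cons.mp hz with rfl | hz
    · exact hcdig
    · exact hd'_all z hz
  have hend : pvAFindNonDigit (PySem.List.enumerate (c :: (d' ++ y :: q')) (p.length : Int))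
      = (p.length : Int) + (d'.length : Int) + 1 := by
    have h := pvAFindNonDigit_spec (c :: d') hcd_all y hy q' (p.length : Int)
    rw [List.cons_append] at h
    rw [h]
    push_cast [List.length_cons]
    ring
  have hB : pvBLoop (PySem.List.enumerate s.toList 0) none
      = (some (p.length : Int), some ((p.length : Int) + (d'.length : Int) + 1)) := by
    rw [hcs_eq, pvBLoop_skip p hp_all c hcdig _ 0,
      pvBLoop_run d' hd'_all y hy q' (0 + (p.length : Int) + 1) (0 + (p.length : Int))]
    simp only [Prod.mk.injEq, Option.some.injEq]
    constructor <;> ring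
  simp only [get_first_int_in_string, get_first_int_in_string_alt, hbegin, hdrop, hend, hB,
    Option.getD_some]

theorem get_first_int_in_string_raises : Claim_raises_get_first_int_in_string := by
  unfold Claim_raises_get_first_int_in_string
  constructor
  · intro s _ hr hpre; exact hpre hr.2
  · exact ⟨by decide, by decide, by decide⟩

-- self-check: the raise witness really lies in the crash-fix region and outside Pre_
theorem pvRaiseWitness_get_first_int_in_string_ok :
    Raises_get_first_int_in_string pvRaiseWitness_get_first_int_in_string ∧
    ¬ Pre_get_first_int_in_string pvRaiseWitness_get_first_int_in_string :=
  ⟨get_first_int_in_string_raises.2.2.1,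
   get_first_int_in_string_raises.1 _ (by decide) get_first_int_in_string_raises.2.2.1⟩
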